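-- pv_equiv track=rewrite | github.com/djordje-kalojevic/LinguaScrape | file_processing.py | _preprocess_links
-- ===== SOURCE A (Python) =====
-- from collections import OrderedDict
--
-- def _preprocess_links(links: list[str]) -> list[str]:
--     """Preprocesses a list of links to be compatible with textise.net.
--
--     The function removes duplicates without disrupting the order of the original list,
--     turns all links to lowercase, and removes any invalid links.
--
--     Args:
--         - links (List[str]): Links to preprocess.
--
--     Returns:
--         - list[str]: Valid, processed links."""
--
--     processed_links: list[str] = []
--     links = list(map(str.lower, links))
--     unique_links = list(OrderedDict.fromkeys(links))
--
--     for link in unique_links: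
--         if link.endswith((".pdf", "rss=1", "atom=1")):
--             continue
--
--         if link.startswith("https://"):
--             processed_link = link[8:]
--         elif link.startswith("http://"):
--             processed_link = link[7:]
--         elif link.startswith("www."):
--             processed_link = link[4:]
--         else:
--             continue
--
--         processed_links.append(processed_link)
--
--     return processed_links
-- ===== SOURCE B (Python) =====
-- def _preprocess_links(links: list[str]) -> list[str]:
--     """Nub-by-removal: repeatedly transform the current head and delete all its
--     later duplicates from the remainder, so no dedup container is needed."""
--
--     def strip(link):
--         if link.endswith((".pdf", "rss=1", "atom=1")):
--             return []
--         for prefix in ("https://", "http://", "www."):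
--             if link.startswith(prefix):
--                 return [link[len(prefix):]]
--         return []
--
--     out = []
--     rest = [link.lower() for link in links]
--     while rest:
--         head = rest[0]
--         out += strip(head)
--         rest = [l for l in rest[1:] if l != head]
--     return out
-- ===== Notes on version B (the rewrite author's own statement) =====
-- stated objective: alternative
-- what changed: Replaces A's three staged passes (map-lower, OrderedDict.fromkeys dedup, filter loop) with a nub-by-removal loop that carries no dedup container: it transforms the current head and deletes all its later duplicates from the remaining list each round.
import Mathlib
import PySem

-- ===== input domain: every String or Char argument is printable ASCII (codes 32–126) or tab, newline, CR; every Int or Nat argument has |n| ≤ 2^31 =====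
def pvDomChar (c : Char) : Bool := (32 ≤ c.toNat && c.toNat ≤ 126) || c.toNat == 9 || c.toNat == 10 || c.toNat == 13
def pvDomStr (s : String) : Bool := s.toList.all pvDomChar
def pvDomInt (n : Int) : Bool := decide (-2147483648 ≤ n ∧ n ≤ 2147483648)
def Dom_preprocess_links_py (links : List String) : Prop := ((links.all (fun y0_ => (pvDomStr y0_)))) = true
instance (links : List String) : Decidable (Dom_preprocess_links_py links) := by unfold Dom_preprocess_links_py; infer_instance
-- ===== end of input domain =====

-- B replaces A's map-lower / OrderedDict dedup / filter loop with a nub-by-removal loop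
-- (transform the head, delete its later duplicates, continue): no dedup container at all;
-- same output, proved equal (objective: alternative, not faster).

-- ===== PORT A =====
def preprocess_links_py (links : List String) : List String :=
  let links' := links.map PySem.Str.lower
  let unique_links := PySem.List.dedup links'
  unique_links.foldl
    (fun processed_links link =>
      if PySem.Str.endswith link ".pdf" || PySem.Str.endswith link "rss=1" ||
         PySem.Str.endswith link "atom=1" then
        processed_links
      else if PySem.Str.startswith link "https://" then
        processed_links ++ [PySem.Str.slice link (some 8) none]
      else if PySem.Str.startswith link "http://" then
        processed_links ++ [PySem.Str.slice link (some 7) none]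
      else if PySem.Str.startswith link "www." then
        processed_links ++ [PySem.Str.slice link (some 4) none]
      else
        processed_links)
    []

-- ===== PORT B =====
-- Source B's `strip` helper: the `for prefix in (...)` loop, ported as recursion over the tuple
def pvStripGo (link : String) : List String → List String
  | [] => []
  | p :: ps =>
      if PySem.Str.startswith link p then
        [PySem.Str.slice link (some (PySem.Str.len p)) none]
      else pvStripGo link ps

def pvStrip (link : String) : List String :=
  if PySem.Str.endswith link ".pdf" || PySem.Str.endswith link "rss=1" ||
     PySem.Str.endswith link "atom=1" then []
  else pvStripGo link ["https://", "http://", "www."]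

-- Source B's `while rest:` loop, state = (out, rest); rest shrinks each round
def pvGo (out : List String) (rest : List String) : List String :=
  match rest with
  | [] => out
  | head :: tail =>
      pvGo (out ++ pvStrip head) (tail.filter (fun l => l != head))
termination_by rest.length
decreasing_by
  simp only [List.length_cons]
  exact Nat.lt_succ_of_le (by simpa using List.length_filter_le (fun l => l != head) tail)

def preprocess_links_py_alt (links : List String) : List String :=
  pvGo [] (links.map PySem.Str.lower)

-- ===== PRECONDITION & SPEC =====
def Spec_preprocess_links_py (links : List String) (out : List String) : Prop := out = preprocess_links_py_alt links
instance (links : List String) (out : List String) : Decidable (Spec_preprocess_links_py links out) := by unfold Spec_preprocess_links_py; infer_instance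

-- ===== CLAIM (what is proved, stated in full; the proofs are below) =====
def Claim_equal_preprocess_links_py : Prop := ∀ (links : List String), Dom_preprocess_links_py links → Spec_preprocess_links_py links (preprocess_links_py links)

-- ===== LEMMAS AND PROOFS =====

-- the per-link contribution of A's loop body (empty if filtered, else the stripped link)
def pvG (link : String) : List String :=
  if PySem.Str.endswith link ".pdf" || PySem.Str.endswith link "rss=1" ||
     PySem.Str.endswith link "atom=1" then []
  else if PySem.Str.startswith link "https://" then [PySem.Str.slice link (some 8) none]
  else if PySem.Str.startswith link "http://" then [PySem.Str.slice link (some 7) none]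
  else if PySem.Str.startswith link "www." then [PySem.Str.slice link (some 4) none]
  else []

theorem pvStrip_eq_pvG (link : String) : pvStrip link = pvG link := by
  simp only [pvStrip, pvStripGo, pvG,
    show PySem.Str.len "https://" = 8 from by decide,
    show PySem.Str.len "http://" = 7 from by decide,
    show PySem.Str.len "www." = 4 from by decide]

-- the new elements first-occurrence dedup appends, given an already-seen set
def pvNw : List String → PySem.Set String → List String
  | [], _ => []
  | x :: xs, s =>
      if PySem.Set.contains s x then pvNw xs s else x :: pvNw xs (PySem.Set.add s x)

theorem pvFoldl_add_eq_nw : ∀ (xs : List String) (s : PySem.Set String),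
    xs.foldl PySem.Set.add s = s ++ pvNw xs s := by
  intro xs
  induction xs with
  | nil => intro s; simp [pvNw]
  | cons x xs ih =>
      intro s
      by_cases hx : x ∈ s
      · simp [List.foldl, pvNw, PySem.Set.add, hx, ih]
      · simp [List.foldl, pvNw, PySem.Set.add, hx, ih (s ++ [x])]

theorem pvA_fold_eq_flatMap : ∀ (xs out : List String),
    xs.foldl
      (fun processed_links link =>
        if PySem.Str.endswith link ".pdf" || PySem.Str.endswith link "rss=1" ||
           PySem.Str.endswith link "atom=1" then processed_links
        else if PySem.Str.startswith link "https://" then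
          processed_links ++ [PySem.Str.slice link (some 8) none]
        else if PySem.Str.startswith link "http://" then
          processed_links ++ [PySem.Str.slice link (some 7) none]
        else if PySem.Str.startswith link "www." then
          processed_links ++ [PySem.Str.slice link (some 4) none]
        else processed_links) out
    = out ++ xs.flatMap pvG := by
  intro xs
  induction xs with
  | nil => intro out; simp
  | cons x xs ih =>
      intro out
      simp only [List.foldl, List.flatMap_cons]
      rw [ih]
      unfold pvG
      split_ifs <;> simp

-- membership-congruence for pvNw: removing x from the list = having x in the seen set
theorem pvNw_filter : ∀ (xs : List String) (s₁ s₂ : PySem.Set String) (x : String),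
    (∀ y, y ∈ s₁ ↔ (y ∈ s₂ ∨ y = x)) →
    pvNw xs s₁ = pvNw (xs.filter (fun l => l != x)) s₂ := by
  intro xs
  induction xs with
  | nil => intro s₁ s₂ x _; simp [pvNw]
  | cons y ys ih =>
      intro s₁ s₂ x h
      by_cases hyx : y = x
      · subst hyx
        have h1 : PySem.Set.contains s₁ y = true := by
          simp [PySem.Set.contains, (h y).2 (Or.inr rfl)]
        rw [List.filter_cons_of_neg (by simp)]
        simp only [pvNw, h1, if_pos]
        exact ih s₁ s₂ y h
      · have hmem : y ∈ s₁ ↔ y ∈ s₂ := by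
          constructor
          · intro hy; rcases (h y).1 hy with h' | h'; exact h'; exact absurd h' hyx
          · intro hy; exact (h y).2 (Or.inl hy)
        by_cases hy2 : y ∈ s₂
        · have h1 : PySem.Set.contains s₁ y = true := by
            simp [PySem.Set.contains, hmem.2 hy2]
          have h2 : PySem.Set.contains s₂ y = true := by
            simp [PySem.Set.contains, hy2]
          rw [List.filter_cons_of_pos (by simp [hyx])]
          simp only [pvNw, h1, h2, if_pos]
          exact ih s₁ s₂ x h
        · have hy1 : y ∉ s₁ := fun hy => hy2 (hmem.1 hy)
          have h1 : PySem.Set.contains s₁ y = false := by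
            simp [PySem.Set.contains, hy1]
          have h2 : PySem.Set.contains s₂ y = false := by
            simp [PySem.Set.contains, hy2]
          rw [List.filter_cons_of_pos (by simp [hyx])]
          simp only [pvNw, h1, h2, Bool.false_eq_true, if_false, List.cons.injEq, true_and]
          apply ih
          intro z
          simp only [PySem.Set.add, PySem.Set.contains]
          rw [if_neg (by simpa using hy1), if_neg (by simpa using hy2)]
          by_cases hz : z = y <;> simp [List.mem_append, hz, h z]

theorem pvGo_eq : ∀ (n : Nat) (rest out : List String), rest.length ≤ n →
    pvGo out rest = out ++ (pvNw rest []).flatMap pvG := by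
  intro n
  induction n with
  | zero =>
      intro rest out h
      have : rest = [] := List.eq_nil_of_length_eq_zero (Nat.le_zero.mp h)
      subst this
      simp [pvGo, pvNw]
  | succ n ih =>
      intro rest out h
      match rest with
      | [] => simp [pvGo, pvNw]
      | head :: tail =>
          rw [pvGo]
          rw [ih (tail.filter (fun l => l != head)) (out ++ pvStrip head)
              (Nat.le_trans (List.length_filter_le _ _) (Nat.le_of_succ_le_succ h))]
          have hnw : pvNw (head :: tail) [] =
              head :: pvNw (tail.filter (fun l => l != head)) [] := by
            simp only [pvNw, PySem.Set.contains, List.contains_nil, Bool.false_eq_true,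
              if_false, List.cons.injEq, true_and]
            rw [← pvNw_filter tail (PySem.Set.add [] head) [] head]
            intro y; simp [PySem.Set.add, PySem.Set.contains]
          rw [hnw]
          simp [pvStrip_eq_pvG]

-- ===== VERDICT (by name: the statement is the Claim_ definition above) =====
theorem preprocess_links_py_spec : Claim_equal_preprocess_links_py := by
  intro links _
  simp only [Spec_preprocess_links_py, preprocess_links_py, preprocess_links_py_alt]
  rw [PySem.List.dedup_eq_ofList, PySem.Set.ofList_eq_foldl,
      pvFoldl_add_eq_nw (links.map PySem.Str.lower) ([]),
      pvA_fold_eq_flatMap,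
      pvGo_eq (links.map PySem.Str.lower).length _ [] (le_refl _)]
  simp
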